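-- pv_equiv track=rewrite | github.com/MABILYJohan/IAATP | TP1/TP1prog5.py | distance_entre_2_points
-- ===== SOURCE A (Python) =====
-- def distance_entre_2_points (a, b, d):
-- 	i=0
-- 	coord = []
-- 	while i<d:
-- 		coord.append(a[i] + b[i])
-- 		i+=1
-- 	tmp = 0;
-- 	i=0
-- 	while i<d:
-- 		tmp = max(tmp, coord[i])
-- 		i+=1
-- 	return tmp
-- ===== SOURCE B (Python) =====
-- def distance_entre_2_points(a, b, d):
--     # Divide-and-conquer: best(lo, hi) is the maximum of a[i]+b[i] over lo <= i < hi.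
--     def best(lo, hi):
--         if hi - lo <= 1:
--             return a[lo] + b[lo]
--         mid = (lo + hi) // 2
--         return max(best(lo, mid), best(mid, hi))
--     if d <= 0:
--         return 0
--     return max(0, best(0, d))
-- ===== Notes on version B (the rewrite author's own statement) =====
-- stated objective: alternative
-- what changed: A builds a full intermediate list of element-wise sums with one while-loop and then scans it with a second while-loop; B computes the maximum sum by recursive divide-and-conquer on the index range (split at the midpoint, combine with max), with an explicit 0 result for d <= 0 and a 0 floor otherwise, never materialising any list.
import Mathlib
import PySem

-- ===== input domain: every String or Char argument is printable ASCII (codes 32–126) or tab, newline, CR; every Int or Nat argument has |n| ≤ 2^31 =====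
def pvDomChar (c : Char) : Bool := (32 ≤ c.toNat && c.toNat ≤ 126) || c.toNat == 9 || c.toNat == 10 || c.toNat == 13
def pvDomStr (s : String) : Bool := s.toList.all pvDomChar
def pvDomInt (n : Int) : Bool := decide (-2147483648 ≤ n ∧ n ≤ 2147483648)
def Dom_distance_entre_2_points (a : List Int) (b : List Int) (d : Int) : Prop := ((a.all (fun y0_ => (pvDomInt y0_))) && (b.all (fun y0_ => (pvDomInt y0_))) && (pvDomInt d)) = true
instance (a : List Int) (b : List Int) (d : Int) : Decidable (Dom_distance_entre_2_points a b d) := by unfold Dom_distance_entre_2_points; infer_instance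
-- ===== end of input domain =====

-- B replaces A's build-then-scan pair of while-loops by a recursive divide-and-conquer maximum over the index range (alternative decomposition, no intermediate list).


-- ===== PORT A =====
-- first while loop: appends a[i]+b[i] to coord while i<d (fuel = d.toNat suffices: i starts at 0)
def pvLoop1 (a : List Int) (b : List Int) (d : Int) : Nat → Int → List Int → List Int
  | 0, _, coord => coord
  | Nat.succ f, i, coord =>
    if i < d then
      pvLoop1 a b d f (i + 1) (coord ++ [PySem.List.pyGetD a i 0 + PySem.List.pyGetD b i 0])
    else coord

-- second while loop: tmp = max(tmp, coord[i]) while i<d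
def pvLoop2 (coord : List Int) (d : Int) : Nat → Int → Int → Int
  | 0, _, tmp => tmp
  | Nat.succ f, i, tmp =>
    if i < d then pvLoop2 coord d f (i + 1) (max tmp (PySem.List.pyGetD coord i 0)) else tmp

def distance_entre_2_points (a : List Int) (b : List Int) (d : Int) : Int :=
  let coord := pvLoop1 a b d d.toNat 0 []
  pvLoop2 coord d d.toNat 0 0

-- ===== PORT B =====
-- best(lo, hi): max of a[i]+b[i] over lo <= i < hi, by splitting the range at the midpoint
def pvBest (a b : List Int) (lo hi : Int) : Int :=
  if hi - lo ≤ 1 then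
    PySem.List.pyGetD a lo 0 + PySem.List.pyGetD b lo 0
  else
    max (pvBest a b lo (PySem.Int.floordiv (lo + hi) 2))
        (pvBest a b (PySem.Int.floordiv (lo + hi) 2) hi)
termination_by (hi - lo).toNat
decreasing_by
  all_goals
    rw [PySem.Int.floordiv_eq_ediv_of_pos (by omega : (0:Int) < 2)]
    omega

def distance_entre_2_points_alt (a : List Int) (b : List Int) (d : Int) : Int :=
  if d ≤ 0 then 0 else max 0 (pvBest a b 0 d)

-- ===== PRECONDITION & SPEC =====
-- Pre_ excludes exactly the inputs where Python A raises IndexError: d larger than a length (for d ≤ 0 the loops never index).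
def Pre_distance_entre_2_points (a : List Int) (b : List Int) (d : Int) : Prop :=
  d ≤ (a.length : Int) ∧ d ≤ (b.length : Int)
instance (a : List Int) (b : List Int) (d : Int) : Decidable (Pre_distance_entre_2_points a b d) := by unfold Pre_distance_entre_2_points; infer_instance
def pvWitness_distance_entre_2_points : List Int × List Int × Int := ([1, -2], [3, 4], 2)

def Spec_distance_entre_2_points (a : List Int) (b : List Int) (d : Int) (out : Int) : Prop := out = distance_entre_2_points_alt a b d
instance (a : List Int) (b : List Int) (d : Int) (out : Int) : Decidable (Spec_distance_entre_2_points a b d out) := by unfold Spec_distance_entre_2_points; infer_instance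

-- ===== CLAIM =====
def Claim_equal_distance_entre_2_points : Prop := ∀ (a : List Int) (b : List Int) (d : Int), Dom_distance_entre_2_points a b d → Pre_distance_entre_2_points a b d → Spec_distance_entre_2_points a b d (distance_entre_2_points a b d)

-- ===== LEMMAS AND PROOFS =====

-- maximum of a nonempty list, used to characterise both sides
def pvMaxNE (x : Int) (t : List Int) : Int := t.foldl max x

theorem pvLoop1_eq (a b : List Int) (d : Int) :
    ∀ (fuel : Nat) (i : Int) (coord : List Int), fuel = (d - i).toNat →
      pvLoop1 a b d fuel i coord
        = coord ++ (PySem.List.pyRange i d 1).map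
            (fun j => PySem.List.pyGetD a j 0 + PySem.List.pyGetD b j 0) := by
  intro fuel
  induction fuel with
  | zero =>
    intro i coord h
    have hd : d ≤ i := by omega
    simp [pvLoop1, PySem.List.pyRange_one, show (d - i).toNat = 0 by omega]
  | succ f ih =>
    intro i coord h
    have hi : i < d := by omega
    rw [pvLoop1, if_pos hi, ih (i + 1) _ (by omega),
        PySem.List.pyRange_one_cons hi]
    simp

theorem pvLoop2_eq (coord : List Int) (d : Int)
    (f : Int → Int) (hc : coord = (PySem.List.pyRange 0 d 1).map f) :
    ∀ (fuel : Nat) (i : Int) (tmp : Int), 0 ≤ i → fuel = (d - i).toNat →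
      pvLoop2 coord d fuel i tmp
        = List.foldl (fun t j => max t (f j)) tmp (PySem.List.pyRange i d 1) := by
  intro fuel
  induction fuel with
  | zero =>
    intro i tmp h0 h
    have hd : d ≤ i := by omega
    simp [pvLoop2, PySem.List.pyRange_one, show (d - i).toNat = 0 by omega]
  | succ f' ih =>
    intro i tmp h0 h
    have hi : i < d := by omega
    have hget : PySem.List.pyGetD coord i 0 = f i := by
      rw [hc]
      exact PySem.List.pyGetD_map_pyRange_of_nonneg f d i 0 h0 hi
    rw [pvLoop2, if_pos hi, ih (i + 1) _ (by omega) (by omega),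
        PySem.List.pyRange_one_cons hi]
    simp [hget]

theorem pv_foldl_max_comm (t : List Int) : ∀ (c x : Int),
    List.foldl max (max c x) t = max c (List.foldl max x t) := by
  induction t with
  | nil => intro c x; simp
  | cons y t ih =>
    intro c x
    simp only [List.foldl_cons]
    rw [max_assoc, ih]

theorem pvMaxNE_append (x : Int) (t : List Int) (y : Int) (s : List Int) :
    pvMaxNE x (t ++ y :: s) = max (pvMaxNE x t) (pvMaxNE y s) := by
  unfold pvMaxNE
  rw [List.foldl_append, List.foldl_cons, pv_foldl_max_comm]

-- pvBest computes the maximum of the mapped sums over the (nonempty) range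
theorem pvBest_eq (a b : List Int) :
    ∀ (n : Nat) (lo hi : Int), (hi - lo).toNat ≤ n → lo < hi →
      pvBest a b lo hi
        = pvMaxNE (PySem.List.pyGetD a lo 0 + PySem.List.pyGetD b lo 0)
            ((PySem.List.pyRange (lo + 1) hi 1).map
              (fun j => PySem.List.pyGetD a j 0 + PySem.List.pyGetD b j 0)) := by
  intro n
  induction n with
  | zero => intro lo hi hn hlt; omega
  | succ n ih =>
    intro lo hi hn hlt
    by_cases h1 : hi - lo ≤ 1
    · have : hi = lo + 1 := by omega
      subst this
      rw [pvBest]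
      simp [pvMaxNE, PySem.List.pyRange_one_eq_nil (by omega : lo + 1 ≤ lo + 1)]
    · rw [pvBest, if_neg h1]
      have hmid : PySem.Int.floordiv (lo + hi) 2 = (lo + hi) / 2 :=
        PySem.Int.floordiv_eq_ediv_of_pos (by omega)
      set mid := PySem.Int.floordiv (lo + hi) 2 with hm
      have hlom : lo < mid := by omega
      have hmhi : mid < hi := by omega
      rw [ih lo mid (by omega) hlom, ih mid hi (by omega) hmhi]
      have hsplit : PySem.List.pyRange (lo + 1) hi 1
          = PySem.List.pyRange (lo + 1) mid 1 ++ PySem.List.pyRange mid hi 1 :=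
        PySem.List.pyRange_one_append (lo + 1) mid hi (by omega) (by omega)
      rw [hsplit, List.map_append, PySem.List.pyRange_one_cons hmhi, List.map_cons,
          pvMaxNE_append]

-- ===== VERDICT =====
theorem distance_entre_2_points_spec : Claim_equal_distance_entre_2_points := by
  intro a b d _ _
  unfold Spec_distance_entre_2_points distance_entre_2_points distance_entre_2_points_alt
  set f : Int → Int := fun j => PySem.List.pyGetD a j 0 + PySem.List.pyGetD b j 0 with hf
  rw [pvLoop1_eq a b d d.toNat 0 [] (by omega)]
  simp only [List.nil_append]
  rw [pvLoop2_eq _ d f rfl d.toNat 0 0 (by omega) (by omega)]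
  have hfold : List.foldl (fun t j => max t (f j)) 0 (PySem.List.pyRange 0 d 1)
      = List.foldl max 0 ((PySem.List.pyRange 0 d 1).map f) := by
    rw [List.foldl_map]
  rw [hfold]
  by_cases hd : d ≤ 0
  · rw [if_pos hd, PySem.List.pyRange_one_eq_nil hd]
    simp
  · rw [if_neg hd]
    have hlt : (0 : Int) < d := by omega
    rw [pvBest_eq a b d.toNat 0 d (by omega) hlt]
    rw [PySem.List.pyRange_one_cons hlt, List.map_cons, List.foldl_cons]
    rw [pv_foldl_max_comm]
    rfl
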